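-- pv_equiv track=rewrite | github.com/Jordi-vs/rp | src/accuracy_pipeline.py | concatenate_dictionary_values
-- ===== SOURCE A (Python) =====
-- def concatenate_dictionary_values(dictionary):
--     result = {}
--
--     for key, value in dictionary.items():
--         key_split = key.split('/')[1]
--         parts = key_split.split('_')[0:3]  # Extract the necessary parts for prefix
--         prefix = '_'.join(parts).split('.')[0] + '.png'
--
--         # Check if there's a matching prefix in the dictionary
--         if prefix in result:
--             result[prefix] += ' ' + value
--         else:
--             result[prefix] = value
--
--     return result
-- ===== SOURCE B (Python) =====
-- def concatenate_dictionary_values(dictionary):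
--     def derive(key):
--         key_split = key.split('/')[1]
--         parts = key_split.split('_')[0:3]  # Extract the necessary parts for prefix
--         return '_'.join(parts).split('.')[0] + '.png'
--
--     pairs = [(derive(key), value) for key, value in dictionary.items()]
--     result = {}
--     for prefix, _ in pairs:
--         if prefix not in result:
--             result[prefix] = ' '.join(v for p, v in pairs if p == prefix)
--     return result
-- ===== Notes on version B (the rewrite author's own statement) =====
-- stated objective: alternative
-- what changed: B first materialises the full (prefix, value) pair list, then builds each output entry whole at the prefix's first occurrence by scanning all pairs and joining every matching value at once, instead of A's single pass that incrementally concatenates strings into the result dict.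
import Mathlib
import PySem

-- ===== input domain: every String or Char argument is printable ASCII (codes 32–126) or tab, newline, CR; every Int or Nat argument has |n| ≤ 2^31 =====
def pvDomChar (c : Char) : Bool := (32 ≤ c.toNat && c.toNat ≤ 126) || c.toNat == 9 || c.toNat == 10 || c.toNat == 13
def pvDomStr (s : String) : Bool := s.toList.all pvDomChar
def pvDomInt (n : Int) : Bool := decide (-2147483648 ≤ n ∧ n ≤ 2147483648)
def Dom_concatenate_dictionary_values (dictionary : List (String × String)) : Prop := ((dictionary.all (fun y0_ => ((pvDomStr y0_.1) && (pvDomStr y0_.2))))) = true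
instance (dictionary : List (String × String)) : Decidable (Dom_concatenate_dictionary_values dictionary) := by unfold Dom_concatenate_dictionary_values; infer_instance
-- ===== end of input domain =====

-- B materialises the (prefix, value) pair list first, then builds each output entry whole at a
-- prefix's first occurrence by scanning all pairs, instead of A's incremental in-dict concatenation.

-- ===== PORT A =====
-- shared prefix derivation: key.split('/')[1], split('_')[0:3], '_'.join(...).split('.')[0] + '.png'
-- (none = the IndexError of key.split('/')[1]; both Pythons run these exact lines)
def pvPrefix? (key : String) : Option String :=
  match PySem.List.pyGet? ((PySem.Str.split? key "/").getD []) 1 with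
  | none => none
  | some key_split =>
      let parts := PySem.List.slice ((PySem.Str.split? key_split "_").getD []) (some 0) (some 3)
      some (PySem.List.pyGetD ((PySem.Str.split? (PySem.Str.join "_" parts) ".").getD []) 0 "" ++ ".png")

-- A's loop body: result[prefix] += ' ' + value  /  result[prefix] = value
def pvStepA (result : PySem.Dict String String) (kv : String × String) : PySem.Dict String String :=
  match pvPrefix? kv.1 with
  | none => result        -- Python raises IndexError here; excluded by Pre_
  | some pfx =>
      if result.contains pfx then
        result.modify pfx "" (fun s => s ++ (" " ++ kv.2))
      else
        result.insert pfx kv.2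

def concatenate_dictionary_values (dictionary : List (String × String)) : List (String × String) :=
  (dictionary.foldl pvStepA PySem.Dict.empty).items

-- ===== PORT B =====
-- B's first pass: pairs = [(derive(key), value) for key, value in dictionary.items()]
-- (a key on which derive raises IndexError is skipped here; such inputs are excluded by Pre_)
def pvPairs (dictionary : List (String × String)) : List (String × String) :=
  dictionary.filterMap (fun kv => (pvPrefix? kv.1).map (fun p => (p, kv.2)))

-- B's second pass: at a prefix's first occurrence, join every matching value from pairs at once
def concatenate_dictionary_values_alt (dictionary : List (String × String)) : List (String × String) :=
  let pairs := pvPairs dictionary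
  (pairs.foldl
    (fun r q =>
      if r.contains q.1 then r
      else r.insert q.1 (PySem.Str.join " " ((pairs.filter (fun x => x.1 == q.1)).map Prod.snd)))
    PySem.Dict.empty).items

-- ===== PRECONDITION & SPEC =====
-- Pre_ excludes exactly the inputs where a key contains no '/' : there key.split('/')[1]
-- raises IndexError in A (and in B, which runs the same derivation lines).
def Pre_concatenate_dictionary_values (dictionary : List (String × String)) : Prop :=
  dictionary.all (fun kv => kv.1.toList.contains '/') = true
instance (dictionary : List (String × String)) : Decidable (Pre_concatenate_dictionary_values dictionary) := by unfold Pre_concatenate_dictionary_values; infer_instance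

def pvWitness_concatenate_dictionary_values : (List (String × String)) :=
  [("img/a_b_c.jpg", "one"), ("img/a_b_c.png", "two"), ("img/x_y.jpg", "three")]

def Spec_concatenate_dictionary_values (dictionary : List (String × String)) (out : List (String × String)) : Prop := out = concatenate_dictionary_values_alt dictionary
instance (dictionary : List (String × String)) (out : List (String × String)) : Decidable (Spec_concatenate_dictionary_values dictionary out) := by unfold Spec_concatenate_dictionary_values; infer_instance

-- ===== CLAIM (what is proved, stated in full; the proofs are below) =====
def Claim_equal_concatenate_dictionary_values : Prop := ∀ (dictionary : List (String × String)), Dom_concatenate_dictionary_values dictionary → Pre_concatenate_dictionary_values dictionary → Spec_concatenate_dictionary_values dictionary (concatenate_dictionary_values dictionary)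

-- ===== LEMMAS AND PROOFS =====

-- the value map relating a list-of-strings group dict to A's result dict
def pvJoin1 (q : String × List String) : String × String := (q.1, PySem.Str.join " " q.2)

-- A's loop body on an already-derived (prefix, value) pair
def pvStepA' (result : PySem.Dict String String) (q : String × String) : PySem.Dict String String :=
  if result.contains q.1 then
    result.modify q.1 "" (fun s => s ++ (" " ++ q.2))
  else
    result.insert q.1 q.2

-- the canonical grouping step: append the value to its prefix's list
def pvStepG (d : PySem.Dict String (List String)) (q : String × String) : PySem.Dict String (List String) :=
  d.modify q.1 [] (fun vs => vs ++ [q.2])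

-- first occurrences of a list of keys, in order
def pvFK : List String → List String
  | [] => []
  | k :: t => k :: (pvFK t).filter (fun x => !(x == k))

-- A's fold over the dictionary equals the pair-level fold over pvPairs
theorem pvFoldAPairs : ∀ (l : List (String × String)) (d : PySem.Dict String String),
    l.foldl pvStepA d = (pvPairs l).foldl pvStepA' d
  | [], _ => rfl
  | kv :: rest, d => by
      cases hp : pvPrefix? kv.1 with
      | none =>
          simp only [List.foldl_cons, pvPairs, List.filterMap_cons, hp, Option.map_none]
          rw [show pvStepA d kv = d by unfold pvStepA; rw [hp]]
          exact pvFoldAPairs rest d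
      | some p =>
          simp only [List.foldl_cons, pvPairs, List.filterMap_cons, hp, Option.map_some]
          rw [show pvStepA d kv = pvStepA' d (p, kv.2) by unfold pvStepA pvStepA'; rw [hp]]
          exact pvFoldAPairs rest (pvStepA' d (p, kv.2))

-- ' '.join(l ++ [v]) = ' '.join(l) + ' ' + v  for nonempty l  (Chars level)
theorem pvCharsJoinAppend (sep x : List Char) :
    ∀ (l : List (List Char)), l ≠ [] →
    PySem.Chars.join sep (l ++ [x]) = PySem.Chars.join sep l ++ sep ++ x
  | [], h => absurd rfl h
  | [p], _ => by
      simp [PySem.Chars.join_cons_cons, PySem.Chars.join_singleton]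
  | p :: q :: rest, _ => by
      have hrec := pvCharsJoinAppend sep x (q :: rest) (by simp)
      calc PySem.Chars.join sep ((p :: q :: rest) ++ [x])
          = p ++ sep ++ PySem.Chars.join sep ((q :: rest) ++ [x]) :=
            PySem.Chars.join_cons_cons sep p q (rest ++ [x])
        _ = p ++ sep ++ (PySem.Chars.join sep (q :: rest) ++ sep ++ x) := by rw [hrec]
        _ = PySem.Chars.join sep (p :: q :: rest) ++ sep ++ x := by
            rw [PySem.Chars.join_cons_cons]; simp [List.append_assoc]

theorem pvStrJoinAppend (l : List String) (v : String) (h : l ≠ []) :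
    PySem.Str.join " " (l ++ [v]) = PySem.Str.join " " l ++ (" " ++ v) := by
  simp only [PySem.Str.join, List.map_append, List.map_cons, List.map_nil]
  rw [pvCharsJoinAppend (" ".toList) v.toList (l.map String.toList) (by simpa using h)]
  simp only [String.ofList_append, String.ofList_toList]
  rw [show (" " : String) = String.ofList " ".toList from (String.ofList_toList (s := " ")).symm]
  simp only [String.ofList_toList, String.append_assoc]

theorem pvStrJoinSingleton (v : String) : PySem.Str.join " " [v] = v := by
  simp [PySem.Str.join, PySem.Chars.join_singleton]

-- get? commutes with mapping the values
theorem pvGet?Map (l : List (String × List String)) (k : String) :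
    (PySem.Dict.mk (l.map pvJoin1)).get? k
      = ((PySem.Dict.mk l).get? k).map (PySem.Str.join " ") := by
  induction l with
  | nil => simp [PySem.Dict.get?]
  | cons p rest ih =>
      obtain ⟨pk, pv⟩ := p
      simp only [List.map_cons, pvJoin1, PySem.Dict.get?_mk_cons]
      by_cases h : (pk == k) = true
      · simp [h]
      · simp [h, ih]

theorem pvContainsMap (d : PySem.Dict String (List String)) (k : String) :
    (PySem.Dict.mk (d.items.map pvJoin1)).contains k = d.contains k := by
  simp only [PySem.Dict.contains, List.any_map]
  congr 1

-- one pair step preserves the relation between A's dict and the grouping dict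
theorem pvStepEq (dB : PySem.Dict String (List String)) (q : String × String)
    (hne : ∀ p ∈ dB.items, p.2 ≠ []) :
    pvStepA' (PySem.Dict.mk (dB.items.map pvJoin1)) q
      = PySem.Dict.mk ((pvStepG dB q).items.map pvJoin1) := by
  unfold pvStepA' pvStepG
  rw [pvContainsMap]
  by_cases hc : dB.contains q.1 = true
  · -- the prefix is already a key: A appends ' ' + value, G appends value to the list
    obtain ⟨vs, hvs⟩ : ∃ vs, dB.get? q.1 = some vs := by
      have := PySem.Dict.contains_eq_isSome_get? dB q.1
      rw [hc] at this
      exact Option.isSome_iff_exists.mp this.symm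
    have hvs_ne : vs ≠ [] := hne _ (PySem.Dict.mem_items_of_get?_eq_some dB hvs)
    have hgA : (PySem.Dict.mk (dB.items.map pvJoin1)).getD q.1 "" = PySem.Str.join " " vs := by
      simp [PySem.Dict.getD, pvGet?Map, hvs]
    have hgB : dB.getD q.1 [] = vs := by simp [PySem.Dict.getD, hvs]
    rw [if_pos hc]
    unfold PySem.Dict.modify
    rw [hgA, hgB]
    have hcA : (PySem.Dict.mk (dB.items.map pvJoin1)).contains q.1 = true := by
      rw [pvContainsMap]; exact hc
    apply PySem.Dict.ext
    rw [PySem.Dict.items_insert_of_contains _ _ hcA,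
      PySem.Dict.items_insert_of_contains _ _ hc]
    simp only [List.map_map]
    apply List.map_congr_left
    intro p _
    by_cases hq : (p.1 == q.1) = true
    · simp [Function.comp, pvJoin1, hq, pvStrJoinAppend vs q.2 hvs_ne]
    · simp [Function.comp, pvJoin1, hq]
  · -- fresh prefix: both sides append a new entry
    rw [if_neg hc]
    unfold PySem.Dict.modify
    rw [PySem.Dict.getD_of_not_contains _ _ (by simpa using hc)]
    have hcA : (PySem.Dict.mk (dB.items.map pvJoin1)).contains q.1 = false := by
      rw [pvContainsMap]; simpa using hc
    apply PySem.Dict.ext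
    have hc' : dB.contains q.1 = false := by simpa using hc
    rw [PySem.Dict.items_insert_of_not_contains _ _ hcA,
      PySem.Dict.items_insert_of_not_contains _ _ hc']
    simp [pvJoin1, pvStrJoinSingleton]

theorem pvStepNe (dB : PySem.Dict String (List String)) (q : String × String)
    (hne : ∀ p ∈ dB.items, p.2 ≠ []) :
    ∀ p ∈ (pvStepG dB q).items, p.2 ≠ [] := by
  unfold pvStepG
  intro p hp
  unfold PySem.Dict.modify at hp
  rw [PySem.Dict.mem_items_insert] at hp
  rcases hp with hp | ⟨hp, _⟩
  · subst hp; simp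
  · exact hne _ hp

theorem pvLoopInv : ∀ (l : List (String × String)) (dB : PySem.Dict String (List String)),
    (∀ p ∈ dB.items, p.2 ≠ []) →
    l.foldl pvStepA' (PySem.Dict.mk (dB.items.map pvJoin1))
      = PySem.Dict.mk ((l.foldl pvStepG dB).items.map pvJoin1)
  | [], dB, _ => rfl
  | q :: rest, dB, hne => by
      rw [List.foldl_cons, List.foldl_cons, pvStepEq dB q hne,
        pvLoopInv rest (pvStepG dB q) (pvStepNe dB q hne)]

-- Set.update unfolded into first-occurrence form
theorem pvSetUpdate : ∀ (l : List String) (s : PySem.Set String),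
    PySem.Set.update s l = s ++ (pvFK l).filter (fun x => !(PySem.Set.contains s x))
  | [], s => by simp [PySem.Set.update, pvFK]
  | k :: t, s => by
      have hstep : PySem.Set.update s (k :: t) = PySem.Set.update (PySem.Set.add s k) t := by
        simp [PySem.Set.update]
      rw [hstep, pvSetUpdate t (PySem.Set.add s k),
        show pvFK (k :: t) = k :: (pvFK t).filter (fun x => !(x == k)) from rfl,
        List.filter_cons]
      by_cases hk : k ∈ s
      · have hadd : PySem.Set.add s k = s := by simp [PySem.Set.add, PySem.Set.contains, hk]
        rw [hadd, if_neg (by simp [PySem.Set.contains, hk])]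
        congr 1
        rw [List.filter_filter]
        apply List.filter_congr
        intro x _
        by_cases hx : x = k <;> by_cases hs : x ∈ s <;>
          simp_all [PySem.Set.contains]
      · have hadd : PySem.Set.add s k = s ++ [k] := by simp [PySem.Set.add, PySem.Set.contains, hk]
        rw [hadd, if_pos (by simp [PySem.Set.contains, hk]), List.append_assoc,
          List.singleton_append]
        congr 2
        rw [List.filter_filter]
        apply List.filter_congr
        intro x _
        by_cases hx : x = k <;> by_cases hs : x ∈ s <;>
          simp_all [PySem.Set.contains]
  termination_by l => l.length

-- B's fold, characterised: entries appear at first occurrence, valued by g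
theorem pvFoldBItems (g : String → String) :
    ∀ (l : List (String × String)) (d : PySem.Dict String String),
    (l.foldl (fun r q => if r.contains q.1 then r else r.insert q.1 (g q.1)) d).items
      = d.items ++ ((pvFK (l.map Prod.fst)).filter (fun p => !(d.contains p))).map (fun p => (p, g p))
  | [], d => by simp [pvFK]
  | q :: t, d => by
      rw [List.foldl_cons,
        show pvFK ((q :: t).map Prod.fst)
            = q.1 :: (pvFK (t.map Prod.fst)).filter (fun x => !(x == q.1)) from rfl,
        List.filter_cons]
      by_cases hc : d.contains q.1 = true
      · rw [if_pos hc, pvFoldBItems g t d, if_neg (by simp [hc])]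
        congr 2
        rw [List.filter_filter]
        apply List.filter_congr
        intro x _
        by_cases hx : x = q.1
        · subst hx; simp [hc]
        · simp [hx]
      · have hc' : d.contains q.1 = false := by simpa using hc
        rw [if_neg hc, pvFoldBItems g t (d.insert q.1 (g q.1)),
          PySem.Dict.items_insert_of_not_contains _ _ hc',
          if_pos (by simp [hc']), List.append_assoc, List.map_cons, List.singleton_append]
        congr 3
        rw [List.filter_filter]
        apply List.filter_congr
        intro x _
        rw [PySem.Dict.contains_insert]
        by_cases hx : x = q.1 <;> cases hs : d.contains x <;> simp [hx]
  termination_by l => l.length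

-- the grouping fold's items, in first-occurrence order with gathered values
theorem pvFoldGItems (ps : List (String × String)) :
    (ps.foldl pvStepG PySem.Dict.empty).items
      = (pvFK (ps.map Prod.fst)).map
          (fun k => (k, (ps.filter (fun x => x.1 == k)).map Prod.snd)) := by
  have hkeys : (ps.foldl pvStepG PySem.Dict.empty).keys = pvFK (ps.map Prod.fst) := by
    unfold pvStepG
    rw [PySem.Dict.keys_foldl_modify_key]
    rw [pvSetUpdate]
    simp [PySem.Dict.keys_empty, PySem.Set.contains]
  have hnd : (ps.foldl pvStepG PySem.Dict.empty).keys.Nodup := by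
    unfold pvStepG
    exact PySem.Dict.nodup_keys_foldl_modify_key ps Prod.fst []
      (fun d q => fun vs => vs ++ [q.2]) PySem.Dict.empty (by simp [PySem.Dict.keys_empty])
  rw [PySem.Dict.items_eq_map_keys _ hnd [], hkeys]
  apply List.map_congr_left
  intro k _
  have := PySem.Dict.getD_foldl_modify_append (l := ps) (d := PySem.Dict.empty) (c := k)
  unfold pvStepG
  rw [this]
  simp [PySem.Dict.getD_empty]

-- ===== VERDICT (by name: the statement is the Claim_ definition above) =====
theorem concatenate_dictionary_values_spec : Claim_equal_concatenate_dictionary_values := by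
  intro dictionary _ _
  unfold Spec_concatenate_dictionary_values
  unfold concatenate_dictionary_values concatenate_dictionary_values_alt
  rw [pvFoldAPairs]
  have hA : (pvPairs dictionary).foldl pvStepA' PySem.Dict.empty
      = PySem.Dict.mk (((pvPairs dictionary).foldl pvStepG PySem.Dict.empty).items.map pvJoin1) :=
    pvLoopInv (pvPairs dictionary) PySem.Dict.empty (by intro p hp; simp [PySem.Dict.empty] at hp)
  rw [hA]
  show ((pvPairs dictionary).foldl pvStepG PySem.Dict.empty).items.map pvJoin1 = _
  rw [pvFoldGItems]
  rw [pvFoldBItems (fun p => PySem.Str.join " " (((pvPairs dictionary).filter (fun x => x.1 == p)).map Prod.snd))]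
  rw [show PySem.Dict.empty.items = ([] : List (String × String)) from rfl, List.nil_append,
    List.map_map,
    show (fun p => !PySem.Dict.empty.contains p) = (fun _ : String => true) from
      funext (fun p => by simp [PySem.Dict.contains_empty]),
    List.filter_true]
  apply List.map_congr_left
  intro k _
  simp [pvJoin1, Function.comp]
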